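-- pv_equiv track=rewrite | github.com/larsga/py-snippets | tex2epub/tex2epub.py | scan_to_recursively
-- ===== SOURCE A (Python) =====
-- def scan_to_recursively(source, pos, char, nester):
--     while True:
--         while (pos < len(source) and source[pos] != char and
--                source[pos] != nester):
--             pos += 1
--
--         if source[pos] == nester:
--             pos = scan_to_recursively(source, pos + 1, char, nester) + 1
--         else:
--             break
--
--     return pos
-- ===== SOURCE B (Python) =====
-- def scan_to_recursively(source, pos, char, nester):
--     depth = 0
--     while True:
--         c = source[pos]
--         if c == nester:
--             depth += 1
--         elif c == char and depth == 0:
--             return pos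
--         elif c == char:
--             depth -= 1
--         pos += 1
-- ===== Notes on version B (the rewrite author's own statement) =====
-- stated objective: alternative
-- what changed: Replaced A's self-recursive two-level structure (inner no-match scan plus recursion per nesting level) by one flat character-at-a-time loop that indexes every position once and tracks nesting in an explicit depth counter, with no inner scan and no recursion.
import Mathlib
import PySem

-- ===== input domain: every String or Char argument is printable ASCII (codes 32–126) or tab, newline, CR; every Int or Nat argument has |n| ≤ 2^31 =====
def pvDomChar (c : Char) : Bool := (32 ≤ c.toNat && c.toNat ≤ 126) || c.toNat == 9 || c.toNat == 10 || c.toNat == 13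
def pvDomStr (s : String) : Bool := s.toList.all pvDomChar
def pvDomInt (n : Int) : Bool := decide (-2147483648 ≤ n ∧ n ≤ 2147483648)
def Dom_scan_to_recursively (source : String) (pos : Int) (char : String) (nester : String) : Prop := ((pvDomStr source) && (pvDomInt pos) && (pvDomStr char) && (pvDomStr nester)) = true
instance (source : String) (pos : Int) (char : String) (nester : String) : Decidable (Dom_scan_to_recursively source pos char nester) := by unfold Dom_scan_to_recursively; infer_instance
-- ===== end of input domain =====

-- B replaces A's self-recursion (inner no-match scan + one recursive call per nesting level)
-- by one flat character-at-a-time loop with an explicit depth counter (alternative decomposition).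

-- ===== PORT A =====

-- A's inner `while`: advance p while in range and s[p] matches neither string;
-- `none` = the IndexError Python raises evaluating source[pos] with pos < -len(source).
def pvScanW (cs : List Char) (char nester : String) (p : Int) : Option Int :=
  if _h : p < (cs.length : Int) then
    match PySem.List.pyGet? cs p with
    | none => none
    | some c =>
      if char.toList ≠ [c] ∧ nester.toList ≠ [c] then pvScanW cs char nester (p + 1)
      else some p
  else some p
termination_by ((cs.length : Int) - p).toNat
decreasing_by omega

-- fuel that strictly bounds the recursion depth of A (positions strictly increase call to call)
def pvFuel (cs : List Char) (p : Int) : Nat := ((cs.length : Int) + 2 - p).toNat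

-- A's body: inner scan, then source[pos] (none = IndexError); on nester recurse then continue.
def pvGoA (cs : List Char) (char nester : String) : Nat → Int → Option Int
  | 0, _ => none
  | f + 1, p =>
    match pvScanW cs char nester p with
    | none => none
    | some i =>
      match PySem.List.pyGet? cs i with
      | none => none
      | some c =>
        if nester.toList = [c] then
          match pvGoA cs char nester f (i + 1) with
          | none => none
          | some r => pvGoA cs char nester f (r + 1)
        else some i

def scan_to_recursively (source : String) (pos : Int) (char : String) (nester : String) : Int :=
  (pvGoA source.toList char nester (pvFuel source.toList pos) pos).getD 0

-- ===== PORT B =====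

-- B's single loop: read source[pos] (none = IndexError), bump depth on nester, return on char
-- at depth 0, close a level on char otherwise, and step on; Python's `depth` never goes
-- negative (depth == 0 returns first), so it is carried as a Nat.
def pvStep (cs : List Char) (char nester : String) : Nat → Int → Nat → Option Int
  | 0, _, _ => none
  | f + 1, p, depth =>
    match PySem.List.pyGet? cs p with
    | none => none
    | some c =>
      if nester.toList = [c] then pvStep cs char nester f (p + 1) (depth + 1)
      else if char.toList = [c] then
        match depth with
        | 0 => some p
        | d + 1 => pvStep cs char nester f (p + 1) d
      else pvStep cs char nester f (p + 1) depth

def scan_to_recursively_alt (source : String) (pos : Int) (char : String) (nester : String) : Int :=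
  (pvStep source.toList char nester (pvFuel source.toList pos) pos 0).getD 0

-- ===== PRECONDITION & SPEC =====

-- does position i hold exactly the one-character string t? (a "stop" of the scan)
def pvStop (cs : List Char) (t : String) (i : Int) : Bool :=
  match PySem.List.pyGet? cs i with
  | some c => t.toList == [c]
  | none => false

-- Pre_ = exactly the inputs where Python A returns (elsewhere it raises IndexError, and so
-- does B): pos ≥ -len(source) and some position i ≥ pos holds char (and not nester) with as
-- many nester-stops as char-only-stops before it, i.e. char is reachable at nesting depth 0.
def Pre_scan_to_recursively (source : String) (pos : Int) (char : String) (nester : String) : Prop :=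
  -(source.toList.length : Int) ≤ pos ∧
  ∃ i ∈ PySem.List.pyRange pos (source.toList.length : Int) 1,
    pvStop source.toList char i = true ∧ pvStop source.toList nester i = false ∧
    (PySem.List.pyRange pos i 1).countP (fun j => pvStop source.toList nester j) =
      (PySem.List.pyRange pos i 1).countP
        (fun j => pvStop source.toList char j && !pvStop source.toList nester j)

instance (source : String) (pos : Int) (char : String) (nester : String) : Decidable (Pre_scan_to_recursively source pos char nester) := by unfold Pre_scan_to_recursively; infer_instance

def pvWitness_scan_to_recursively : String × Int × String × String := ("ab", 0, "b", "(")

def Spec_scan_to_recursively (source : String) (pos : Int) (char : String) (nester : String) (out : Int) : Prop := out = scan_to_recursively_alt source pos char nester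
instance (source : String) (pos : Int) (char : String) (nester : String) (out : Int) : Decidable (Spec_scan_to_recursively source pos char nester out) := by unfold Spec_scan_to_recursively; infer_instance

-- ===== CLAIM (what is proved, stated in full; the proofs are below) =====
def Claim_equal_scan_to_recursively : Prop := ∀ (source : String) (pos : Int) (char : String) (nester : String), Dom_scan_to_recursively source pos char nester → Pre_scan_to_recursively source pos char nester → Spec_scan_to_recursively source pos char nester (scan_to_recursively source pos char nester)

-- ===== LEMMAS AND PROOFS =====

theorem pvPyGet?_some_bounds (xs : List Char) (i : Int) (c : Char)
    (h : PySem.List.pyGet? xs i = some c) : -(xs.length : Int) ≤ i ∧ i < (xs.length : Int) := by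
  simp only [PySem.List.pyGet?, PySem.List.pyIdx?] at h
  split at h
  next h1 =>
    split at h
    next h2 => exact ⟨by omega, by omega⟩
    next h2 => simp_all
  next h1 =>
    split at h
    next h2 => exact ⟨h2, by omega⟩
    next h2 => simp_all

theorem pvPyGet?_none_of_ge (xs : List Char) (i : Int) (h : (xs.length : Int) ≤ i) :
    PySem.List.pyGet? xs i = none := by
  cases hg : PySem.List.pyGet? xs i with
  | none => rfl
  | some c => have := pvPyGet?_some_bounds xs i c hg; omega

theorem pvScanW_ge (cs : List Char) (char nester : String) (p i : Int)
    (h : pvScanW cs char nester p = some i) : p ≤ i := by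
  fun_induction pvScanW cs char nester p <;> simp_all; omega

theorem pvGoA_scanW_none (cs : List Char) (char nester : String) (f : Nat) (p : Int)
    (h : pvScanW cs char nester p = none) : pvGoA cs char nester f p = none := by
  cases f <;> simp [pvGoA, h]

theorem pvGoA_get_none (cs : List Char) (char nester : String) (f : Nat) (p i : Int)
    (hs : pvScanW cs char nester p = some i) (hg : PySem.List.pyGet? cs i = none) :
    pvGoA cs char nester f p = none := by
  cases f <;> simp [pvGoA, hs, hg]

theorem pvGoA_some_bounds (cs : List Char) (char nester : String) (f : Nat) :
    ∀ p r, pvGoA cs char nester f p = some r → p ≤ r ∧ r < (cs.length : Int) := by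
  induction f with
  | zero => intro p r h; simp [pvGoA] at h
  | succ f ih =>
    intro p r h
    cases hs : pvScanW cs char nester p with
    | none => simp [pvGoA, hs] at h
    | some i =>
      cases hg : PySem.List.pyGet? cs i with
      | none => simp [pvGoA, hs, hg] at h
      | some c =>
        simp only [pvGoA, hs, hg] at h
        have hpi := pvScanW_ge cs char nester p i hs
        have hb := pvPyGet?_some_bounds cs i c hg
        by_cases hν : nester.toList = [c]
        · rw [if_pos hν] at h
          cases h1 : pvGoA cs char nester f (i + 1) with
          | none => rw [h1] at h; simp at h
          | some r1 =>
            rw [h1] at h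
            have hb1 := ih (i + 1) r1 h1
            have hb2 := ih (r1 + 1) r h
            exact ⟨by omega, hb2.2⟩
        · rw [if_neg hν] at h
          cases h
          exact ⟨hpi, hb.2⟩

theorem pvGoA_fuel (cs : List Char) (char nester : String) (f : Nat) :
    ∀ g p, pvFuel cs p ≤ f → f ≤ g → pvGoA cs char nester f p = pvGoA cs char nester g p := by
  induction f with
  | zero =>
    intro g p hf _
    have hp : (cs.length : Int) + 2 ≤ p := by unfold pvFuel at hf; omega
    have hs : pvScanW cs char nester p = some p := by
      rw [pvScanW]; rw [dif_neg (by omega)]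
    have hg' : PySem.List.pyGet? cs p = none := pvPyGet?_none_of_ge cs p (by omega)
    rw [pvGoA_get_none cs char nester 0 p p hs hg',
        pvGoA_get_none cs char nester g p p hs hg']
  | succ f ih =>
    intro g p hf hg
    cases g with
    | zero => omega
    | succ g' =>
      cases hs : pvScanW cs char nester p with
      | none => simp [pvGoA, hs]
      | some i =>
        cases hget : PySem.List.pyGet? cs i with
        | none => simp [pvGoA, hs, hget]
        | some c =>
          simp only [pvGoA, hs, hget]
          have hpi := pvScanW_ge cs char nester p i hs
          have hb := pvPyGet?_some_bounds cs i c hget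
          by_cases hν : nester.toList = [c]
          · rw [if_pos hν, if_pos hν]
            have hfi : pvFuel cs (i + 1) ≤ f := by unfold pvFuel at hf ⊢; omega
            rw [ih g' (i + 1) hfi (by omega)]
            cases h1 : pvGoA cs char nester g' (i + 1) with
            | none => rfl
            | some r =>
              dsimp only
              have hbr := pvGoA_some_bounds cs char nester g' (i + 1) r h1
              have hfr : pvFuel cs (r + 1) ≤ f := by unfold pvFuel at hf ⊢; omega
              rw [ih g' (r + 1) hfr (by omega)]
          · rw [if_neg hν, if_neg hν]

theorem pvGoA_fuel_eq (cs : List Char) (char nester : String) (f g : Nat) (p : Int)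
    (hf : pvFuel cs p ≤ f) (hg : pvFuel cs p ≤ g) :
    pvGoA cs char nester f p = pvGoA cs char nester g p := by
  rcases le_total f g with h | h
  · exact pvGoA_fuel cs char nester f g p hf h
  · exact (pvGoA_fuel cs char nester g f p hg h).symm

-- A's result through the eyes of B's depth counter: with depth d pending, finish the current
-- level (one run of A), then close d more levels, each starting just after the previous result.
def pvRep (cs : List Char) (char nester : String) : Nat → Int → Option Int
  | 0, p => pvGoA cs char nester (pvFuel cs p) p
  | d + 1, p => (pvGoA cs char nester (pvFuel cs p) p).bind
      (fun r => pvRep cs char nester d (r + 1))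

theorem pvRep_none (cs : List Char) (char nester : String) (p : Int)
    (h : pvGoA cs char nester (pvFuel cs p) p = none) (d : Nat) :
    pvRep cs char nester d p = none := by
  cases d <;> simp [pvRep, h]

theorem pvGoA_unfold_nester (cs : List Char) (char nester : String) (p i : Int) (c : Char)
    (hs : pvScanW cs char nester p = some i) (hget : PySem.List.pyGet? cs i = some c)
    (hν : nester.toList = [c]) :
    pvGoA cs char nester (pvFuel cs p) p =
      (pvGoA cs char nester (pvFuel cs (i + 1)) (i + 1)).bind
        (fun r => pvGoA cs char nester (pvFuel cs (r + 1)) (r + 1)) := by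
  have hpi := pvScanW_ge cs char nester p i hs
  have hb := pvPyGet?_some_bounds cs i c hget
  have h1 : pvFuel cs p = (pvFuel cs p - 1) + 1 := by unfold pvFuel; omega
  rw [h1]
  simp only [pvGoA, hs, hget, if_pos hν]
  have hfi : pvFuel cs (i + 1) ≤ pvFuel cs p - 1 := by unfold pvFuel; omega
  rw [pvGoA_fuel_eq cs char nester (pvFuel cs p - 1) (pvFuel cs (i + 1)) (i + 1) (by omega)
      (le_refl _)]
  cases hx : pvGoA cs char nester (pvFuel cs (i + 1)) (i + 1) with
  | none => simp
  | some r =>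
    simp only [Option.bind_some]
    have hbr := pvGoA_some_bounds cs char nester (pvFuel cs (i + 1)) (i + 1) r hx
    exact pvGoA_fuel_eq cs char nester (pvFuel cs p - 1) (pvFuel cs (r + 1)) (r + 1)
      (by unfold pvFuel; omega) (le_refl _)

theorem pvGoA_char (cs : List Char) (char nester : String) (p i : Int) (c : Char)
    (hs : pvScanW cs char nester p = some i) (hget : PySem.List.pyGet? cs i = some c)
    (hν : nester.toList ≠ [c]) :
    pvGoA cs char nester (pvFuel cs p) p = some i := by
  have hpi := pvScanW_ge cs char nester p i hs
  have hb := pvPyGet?_some_bounds cs i c hget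
  have h1 : pvFuel cs p = (pvFuel cs p - 1) + 1 := by unfold pvFuel; omega
  rw [h1]
  simp only [pvGoA, hs, hget, if_neg hν]

theorem pvRep_nester (cs : List Char) (char nester : String) (p i : Int) (c : Char)
    (hs : pvScanW cs char nester p = some i) (hget : PySem.List.pyGet? cs i = some c)
    (hν : nester.toList = [c]) (d : Nat) :
    pvRep cs char nester d p =
      (pvGoA cs char nester (pvFuel cs (i + 1)) (i + 1)).bind
        (fun r => pvRep cs char nester d (r + 1)) := by
  cases d with
  | zero =>
    show pvGoA cs char nester (pvFuel cs p) p = _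
    rw [pvGoA_unfold_nester cs char nester p i c hs hget hν]
    cases hx : pvGoA cs char nester (pvFuel cs (i + 1)) (i + 1) <;> simp [pvRep]
  | succ d =>
    show (pvGoA cs char nester (pvFuel cs p) p).bind _ = _
    rw [pvGoA_unfold_nester cs char nester p i c hs hget hν, Option.bind_assoc]
    cases hx : pvGoA cs char nester (pvFuel cs (i + 1)) (i + 1) <;> simp [pvRep]

-- stepping over a position matching neither string leaves A's inner scan where it was
theorem pvScanW_skip (cs : List Char) (char nester : String) (p : Int) (c : Char)
    (hget : PySem.List.pyGet? cs p = some c)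
    (hχ : char.toList ≠ [c]) (hν : nester.toList ≠ [c]) :
    pvScanW cs char nester p = pvScanW cs char nester (p + 1) := by
  have hb := pvPyGet?_some_bounds cs p c hget
  rw [pvScanW, dif_pos (by omega), hget]
  simp only [if_pos (show char.toList ≠ [c] ∧ nester.toList ≠ [c] from ⟨hχ, hν⟩)]

theorem pvGoA_skip (cs : List Char) (char nester : String) (p : Int) (c : Char)
    (hget : PySem.List.pyGet? cs p = some c)
    (hχ : char.toList ≠ [c]) (hν : nester.toList ≠ [c]) :
    pvGoA cs char nester (pvFuel cs p) p = pvGoA cs char nester (pvFuel cs (p + 1)) (p + 1) := by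
  have hb := pvPyGet?_some_bounds cs p c hget
  have h1 : pvFuel cs p = pvFuel cs (p + 1) + 1 := by unfold pvFuel; omega
  have h2 : pvFuel cs (p + 1) = (pvFuel cs (p + 1) - 1) + 1 := by unfold pvFuel; omega
  have hsw := pvScanW_skip cs char nester p c hget hχ hν
  rw [h1]
  conv_rhs => rw [h2]
  cases hs : pvScanW cs char nester (p + 1) with
  | none => simp only [pvGoA, hsw, hs]
  | some i =>
    cases hgi : PySem.List.pyGet? cs i with
    | none => simp only [pvGoA, hsw, hs, hgi]
    | some ci =>
      simp only [pvGoA, hsw, hs, hgi]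
      have hpi := pvScanW_ge cs char nester (p + 1) i hs
      have hbi := pvPyGet?_some_bounds cs i ci hgi
      by_cases hν' : nester.toList = [ci]
      · rw [if_pos hν', if_pos hν']
        rw [pvGoA_fuel_eq cs char nester (pvFuel cs (p + 1)) (pvFuel cs (p + 1) - 1) (i + 1)
            (by unfold pvFuel; omega) (by unfold pvFuel; omega)]
        cases h1' : pvGoA cs char nester (pvFuel cs (p + 1) - 1) (i + 1) with
        | none => rfl
        | some r =>
          dsimp only
          have hbr := pvGoA_some_bounds cs char nester (pvFuel cs (p + 1) - 1) (i + 1) r h1'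
          exact pvGoA_fuel_eq cs char nester (pvFuel cs (p + 1)) (pvFuel cs (p + 1) - 1) (r + 1)
            (by unfold pvFuel; omega) (by unfold pvFuel; omega)
      · rw [if_neg hν', if_neg hν']

theorem pvRep_skip (cs : List Char) (char nester : String) (p : Int) (c : Char)
    (hget : PySem.List.pyGet? cs p = some c)
    (hχ : char.toList ≠ [c]) (hν : nester.toList ≠ [c]) (d : Nat) :
    pvRep cs char nester d p = pvRep cs char nester d (p + 1) := by
  cases d <;> simp [pvRep, pvGoA_skip cs char nester p c hget hχ hν]

-- scanning from a position that already stops returns it at once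
theorem pvScanW_self (cs : List Char) (char nester : String) (p : Int) (c : Char)
    (hget : PySem.List.pyGet? cs p = some c) (h : char.toList = [c] ∨ nester.toList = [c]) :
    pvScanW cs char nester p = some p := by
  have hb := pvPyGet?_some_bounds cs p c hget
  rw [pvScanW, dif_pos (by omega), hget]
  simp only []
  rw [if_neg (show ¬(char.toList ≠ [c] ∧ nester.toList ≠ [c]) by tauto)]

-- the key simulation: B's flat loop computes pvRep, A's result seen through the depth counter
theorem pvStep_eq_rep (cs : List Char) (char nester : String) (f : Nat) :
    ∀ p d, pvFuel cs p ≤ f → pvStep cs char nester f p d = pvRep cs char nester d p := by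
  induction f with
  | zero =>
    intro p d hf
    have hp : (cs.length : Int) + 2 ≤ p := by unfold pvFuel at hf; omega
    have hs : pvScanW cs char nester p = some p := by
      rw [pvScanW]; rw [dif_neg (by omega)]
    have hg : PySem.List.pyGet? cs p = none := pvPyGet?_none_of_ge cs p (by omega)
    rw [pvRep_none cs char nester p (pvGoA_get_none cs char nester _ p p hs hg) d]
    simp [pvStep]
  | succ f ih =>
    intro p d hf
    cases hget : PySem.List.pyGet? cs p with
    | none =>
      have hA : pvGoA cs char nester (pvFuel cs p) p = none := by
        by_cases hlt : p < (cs.length : Int)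
        · refine pvGoA_scanW_none cs char nester _ p ?_
          rw [pvScanW, dif_pos hlt, hget]
        · have hs : pvScanW cs char nester p = some p := by
            rw [pvScanW]; rw [dif_neg hlt]
          exact pvGoA_get_none cs char nester _ p p hs hget
      rw [pvRep_none cs char nester p hA d]
      simp [pvStep, hget]
    | some c =>
      have hb := pvPyGet?_some_bounds cs p c hget
      have hfp : pvFuel cs (p + 1) ≤ f := by unfold pvFuel at hf ⊢; omega
      simp only [pvStep, hget]
      by_cases hν : nester.toList = [c]
      · rw [if_pos hν, ih (p + 1) (d + 1) hfp]
        have hs := pvScanW_self cs char nester p c hget (Or.inr hν)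
        rw [pvRep_nester cs char nester p p c hs hget hν d]
        rfl
      · rw [if_neg hν]
        by_cases hχ : char.toList = [c]
        · rw [if_pos hχ]
          have hs := pvScanW_self cs char nester p c hget (Or.inl hχ)
          have hA := pvGoA_char cs char nester p p c hs hget hν
          cases d with
          | zero => show some p = pvGoA cs char nester (pvFuel cs p) p; rw [hA]
          | succ d' =>
            show pvStep cs char nester f (p + 1) d' = _
            rw [ih (p + 1) d' hfp]
            show _ = (pvGoA cs char nester (pvFuel cs p) p).bind _
            rw [hA]
            rfl
        · rw [if_neg hχ, ih (p + 1) d hfp,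
              pvRep_skip cs char nester p c hget hχ hν d]

-- ===== VERDICT (by name: the statement is the Claim_ definition above) =====
theorem scan_to_recursively_spec : Claim_equal_scan_to_recursively := by
  intro source pos char nester _ _
  show scan_to_recursively source pos char nester
      = scan_to_recursively_alt source pos char nester
  unfold scan_to_recursively scan_to_recursively_alt
  rw [pvStep_eq_rep source.toList char nester (pvFuel source.toList pos) pos 0 (le_refl _)]
  rfl
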